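-- pv_equiv track=rewrite | github.com/xianhe-zhang/leetcodeNote | 美服训练/TopFreq300/TopFreq-Bit.py | minMaxGame
-- ===== SOURCE A (Python) =====
-- from typing import List
--
-- def minMaxGame(nums: List[int]) -> int:
--     while len(nums) > 1:
--         temp = []
--         n = int(len(nums) //2)
--         for i in range(n):
--             if i % 2 == 0:
--                 temp.append(min(nums[2*i], nums[2*i + 1]))
--             else:
--                 temp.append(max(nums[2*i], nums[2*i + 1]))
--
--         nums = temp
--     return nums[0]
-- ===== SOURCE B (Python) =====
-- from typing import List
--
-- def minMaxGame(nums: List[int]) -> int: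
--     if len(nums) <= 1:
--         return nums[0]
--     it = iter(nums)
--     nxt = [min(a, b) if i % 2 == 0 else max(a, b)
--            for i, (a, b) in enumerate(zip(it, it))]
--     return minMaxGame(nxt)
-- ===== Notes on version B (the rewrite author's own statement) =====
-- stated objective: alternative
-- what changed: The outer while loop over rounds becomes a recursive descent on successively halved lists, and the index-arithmetic inner loop (nums[2*i], nums[2*i+1] over range(len//2)) is replaced by pairing via enumerate(zip(it, it)) on a single iterator.
-- outside the precondition, e.g. on minMaxGame([]): A raises IndexError, B raises IndexError
import Mathlib
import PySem

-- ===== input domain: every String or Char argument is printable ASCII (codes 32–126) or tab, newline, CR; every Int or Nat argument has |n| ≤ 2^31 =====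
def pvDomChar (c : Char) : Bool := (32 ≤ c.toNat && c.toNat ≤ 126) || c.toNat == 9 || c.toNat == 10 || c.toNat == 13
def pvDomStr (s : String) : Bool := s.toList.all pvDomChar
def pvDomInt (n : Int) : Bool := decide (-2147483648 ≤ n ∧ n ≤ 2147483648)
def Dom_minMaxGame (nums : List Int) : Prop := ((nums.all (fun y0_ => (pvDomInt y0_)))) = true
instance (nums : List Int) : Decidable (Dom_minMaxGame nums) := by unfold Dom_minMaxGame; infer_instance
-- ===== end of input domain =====

-- B replaces A's round-by-round while loop with a recursive descent whose pairing is the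
-- idiomatic zip(it, it) iterator trick; objective: idiomatic/alternative, same cost.

-- ===== PORT A =====
-- one round of A's while loop: temp built by appending min/max of each pair
-- (pyGetD with default 0: inside the loop 2*i and 2*i+1 are always in range, so it is exact)
def pvStepA (nums : List Int) : List Int :=
  (PySem.List.pyRange 0 (PySem.Int.floordiv (nums.length : Int) 2)).foldl
    (fun temp i =>
      temp ++ [if PySem.Int.mod i 2 = 0
               then min (PySem.List.pyGetD nums (2*i) 0) (PySem.List.pyGetD nums (2*i + 1) 0)
               else max (PySem.List.pyGetD nums (2*i) 0) (PySem.List.pyGetD nums (2*i + 1) 0)]) []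

theorem pvStepA_length (nums : List Int) : (pvStepA nums).length = nums.length / 2 := by
  unfold pvStepA
  rw [PySem.List.foldl_append_singleton_eq_map]
  simp only [List.nil_append, List.length_map, PySem.List.length_pyRange_one, sub_zero]
  rw [PySem.Int.floordiv_eq_ediv_of_pos (by omega)]
  omega

def minMaxGame (nums : List Int) : Int :=
  if 1 < nums.length then minMaxGame (pvStepA nums)
  else PySem.List.pyGetD nums 0 0
termination_by nums.length
decreasing_by
  rw [pvStepA_length]; omega

-- ===== PORT B =====
-- zip(it, it) on one iterator: consecutive disjoint pairs (exact hand port of the iterator idiom)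
def pvPairs : List Int → List (Int × Int)
  | a :: b :: rest => (a, b) :: pvPairs rest
  | _ => []

theorem pvPairs_length (xs : List Int) : (pvPairs xs).length = xs.length / 2 := by
  induction xs using pvPairs.induct with
  | case1 a b rest ih => simp [pvPairs, ih]; omega
  | case2 xs h => cases xs with
    | nil => simp [pvPairs]
    | cons a t => cases t with
      | nil => simp [pvPairs]
      | cons b r => exact absurd rfl (h a b r)

-- one round of B: enumerate the pairs, min on even positions, max on odd
def pvStepB (nums : List Int) : List Int :=
  (PySem.List.enumerate (pvPairs nums) 0).map
    (fun q => if PySem.Int.mod q.1 2 = 0 then min q.2.1 q.2.2 else max q.2.1 q.2.2)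

def minMaxGame_alt (nums : List Int) : Int :=
  if nums.length ≤ 1 then PySem.List.pyGetD nums 0 0
  else minMaxGame_alt (pvStepB nums)
termination_by nums.length
decreasing_by
  simp [pvStepB, PySem.List.length_enumerate, pvPairs_length]; omega

-- ===== PRECONDITION & SPEC =====
-- Pre_ excludes only the empty list, on which Python A raises IndexError (nums[0]).
def Pre_minMaxGame (nums : List Int) : Prop := nums ≠ []
instance (nums : List Int) : Decidable (Pre_minMaxGame nums) := by unfold Pre_minMaxGame; infer_instance
def pvWitness_minMaxGame : List Int := [1, 3, 5, 2, 4, 8, 2, 2]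

def Spec_minMaxGame (nums : List Int) (out : Int) : Prop := out = minMaxGame_alt nums
instance (nums : List Int) (out : Int) : Decidable (Spec_minMaxGame nums out) := by unfold Spec_minMaxGame; infer_instance

-- ===== CLAIM (what is proved, stated in full; the proofs are below) =====
def Claim_equal_minMaxGame : Prop := ∀ (nums : List Int), Dom_minMaxGame nums → Pre_minMaxGame nums → Spec_minMaxGame nums (minMaxGame nums)

-- ===== LEMMAS AND PROOFS =====

theorem pyGetD_cons_two (a b : Int) (xs : List Int) (j : Int) (h : 0 ≤ j) (d : Int) :
    PySem.List.pyGetD (a :: b :: xs) (j + 2) d = PySem.List.pyGetD xs j d := by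
  have hL : (a :: b :: xs).length = xs.length + 2 := by simp
  simp only [PySem.List.pyGetD, PySem.List.pyGet?, PySem.List.pyIdx?, hL]
  have c1 : (0:Int) ≤ j + 2 := by omega
  by_cases hlt : j < (xs.length : Int)
  · have c2 : j + 2 < ((xs.length + 2 : Nat) : Int) := by push_cast; omega
    have ht : (j + 2).toNat = j.toNat + 2 := by omega
    rw [if_pos c1, if_pos c2, if_pos h, if_pos hlt, ht]
    simp
  · have c2 : ¬ (j + 2 < ((xs.length + 2 : Nat) : Int)) := by push_cast; omega
    rw [if_pos c1, if_neg c2, if_pos h, if_neg hlt]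
    simp

theorem stepA_core (xs : List Int) (s : Int) (hs : 0 ≤ s) :
    (PySem.List.pyRange s (s + ((pvPairs xs).length : Int))).map
      (fun i => if PySem.Int.mod i 2 = 0
                then min (PySem.List.pyGetD xs (2*(i - s)) 0) (PySem.List.pyGetD xs (2*(i - s) + 1) 0)
                else max (PySem.List.pyGetD xs (2*(i - s)) 0) (PySem.List.pyGetD xs (2*(i - s) + 1) 0))
  = (PySem.List.enumerate (pvPairs xs) s).map
      (fun q => if PySem.Int.mod q.1 2 = 0 then min q.2.1 q.2.2 else max q.2.1 q.2.2) := by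
  induction xs using pvPairs.induct generalizing s with
  | case1 a b rest ih =>
    simp only [pvPairs, List.length_cons, PySem.List.enumerate_cons, List.map_cons]
    rw [PySem.List.pyRange_one_cons (by push_cast; omega), List.map_cons]
    congr 1
    · simp [PySem.List.pyGetD, PySem.List.pyGet?, PySem.List.pyIdx?,
            show (0:Int) ≤ (rest.length : Int) + 1 from by positivity]
    · rw [show s + (((pvPairs rest).length + 1 : Nat) : Int)
            = (s+1) + (((pvPairs rest).length : Nat) : Int) by push_cast; ring]
      rw [← ih (s+1) (by omega)]
      apply List.map_congr_left
      intro i hi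
      rw [PySem.List.mem_pyRange_one] at hi
      have e1 : 2*(i - s) = 2*(i - (s+1)) + 2 := by ring
      rw [e1, show 2*(i - (s+1)) + 2 + 1 = (2*(i - (s+1)) + 1) + 2 by ring,
          pyGetD_cons_two _ _ _ _ (by omega), pyGetD_cons_two _ _ _ _ (by omega)]
  | case2 xs h =>
    have hp : pvPairs xs = [] := by
      cases xs with
      | nil => rfl
      | cons a t => cases t with
        | nil => rfl
        | cons b r => exact absurd rfl (h a b r)
    rw [hp]
    simp only [List.length_nil, Nat.cast_zero, add_zero]
    rw [PySem.List.pyRange_one_eq_nil le_rfl]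
    simp [PySem.List.enumerate]

theorem stepA_eq_stepB (nums : List Int) : pvStepA nums = pvStepB nums := by
  unfold pvStepA pvStepB
  rw [PySem.List.foldl_append_singleton_eq_map, List.nil_append]
  have hn : PySem.Int.floordiv (nums.length : Int) 2 = ((pvPairs nums).length : Int) := by
    rw [PySem.Int.floordiv_eq_ediv_of_pos (by omega), pvPairs_length]
    omega
  rw [hn]
  have := stepA_core nums 0 le_rfl
  rw [show (0:Int) + ((pvPairs nums).length : Int) = ((pvPairs nums).length : Int) by ring] at this
  simp only [sub_zero] at this
  exact this

theorem main_eq (nums : List Int) : minMaxGame nums = minMaxGame_alt nums := by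
  induction hn : nums.length using Nat.strong_induction_on generalizing nums with
  | _ n ih =>
    rw [minMaxGame, minMaxGame_alt]
    by_cases h : 1 < nums.length
    · rw [if_pos h, if_neg (by omega), stepA_eq_stepB]
      exact ih (pvStepB nums).length (by
        have := pvPairs_length nums
        simp [pvStepB, PySem.List.length_enumerate, this]; omega) _ rfl
    · rw [if_neg h, if_pos (by omega)]

-- ===== VERDICT (by name: the statement is the Claim_ definition above) =====
theorem minMaxGame_spec : Claim_equal_minMaxGame := by
  intro nums _ _
  unfold Spec_minMaxGame
  exact main_eq nums
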